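-- pv_equiv track=rewrite | github.com/alsatianco/binturong | tests/oracle/test_text_tools.py | oracle_combining
-- ===== SOURCE A (Python) =====
-- def oracle_combining(text: str, mark: str) -> str:
--     out = []
--     for ch in text:
--         if ch in ("\n", "\r"):
--             out.append(ch)
--         elif ch.isspace():
--             out.append(ch)
--         else:
--             out.append(ch)
--             out.append(mark)
--     return "".join(out)
-- ===== SOURCE B (Python) =====
-- def oracle_combining(text: str, mark: str) -> str:
--     table = {ord(c): c + mark for c in set(text) if not c.isspace()}
--     return text.translate(table)
-- ===== Notes on version B (the rewrite author's own statement) =====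
-- stated objective: idiomatic
-- what changed: Replaced the explicit per-character loop-and-branch accumulation with building a translation table (ord(c) -> c+mark for the distinct non-whitespace characters of text) and a single str.translate pass.
import Mathlib
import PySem

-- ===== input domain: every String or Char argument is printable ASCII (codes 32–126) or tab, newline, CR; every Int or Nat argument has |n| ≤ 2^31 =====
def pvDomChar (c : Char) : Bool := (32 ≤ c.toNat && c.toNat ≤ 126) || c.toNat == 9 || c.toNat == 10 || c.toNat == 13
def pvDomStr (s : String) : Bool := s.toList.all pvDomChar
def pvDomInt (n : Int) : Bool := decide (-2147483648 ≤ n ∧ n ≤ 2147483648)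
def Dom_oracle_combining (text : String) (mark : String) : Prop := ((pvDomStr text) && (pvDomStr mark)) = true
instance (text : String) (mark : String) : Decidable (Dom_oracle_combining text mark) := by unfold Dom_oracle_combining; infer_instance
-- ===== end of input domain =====

-- B replaces A's per-character loop-and-branch with a translation table built from set(text)
-- plus one translate pass (objective: idiomatic); return values agree on all inputs.

-- ===== PORT A =====
-- out is a list of strings (as List Char pieces), joined at the end by "".join.
def oracle_combining (text : String) (mark : String) : String :=
  let out : List (List Char) :=
    text.toList.foldl
      (fun out ch =>
        if ch = '\n' ∨ ch = '\r' then out ++ [[ch]]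
        else if PySem.Chars.isspace ch then out ++ [[ch]]
        else out ++ [[ch], mark.toList])
      []
  String.ofList out.flatten

-- ===== PORT B =====
-- table = {ord(c): c + mark for c in set(text) if not c.isspace()}
def oracleCombiningTable (l : List Char) (mark : List Char) : PySem.Dict Nat (List Char) :=
  (PySem.Set.ofList l).foldl
    (fun d c => if PySem.Chars.isspace c then d else d.insert c.toNat (c :: mark))
    PySem.Dict.empty

-- text.translate(table): each char is replaced by table[ord(c)] if present, else kept.
def oracle_combining_alt (text : String) (mark : String) : String :=
  let table := oracleCombiningTable text.toList mark.toList
  String.ofList ((text.toList.map (fun c => (table.get? c.toNat).getD [c])).flatten)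

-- ===== PRECONDITION & SPEC =====
def Spec_oracle_combining (text : String) (mark : String) (out : String) : Prop := out = oracle_combining_alt text mark
instance (text : String) (mark : String) (out : String) : Decidable (Spec_oracle_combining text mark out) := by unfold Spec_oracle_combining; infer_instance

-- ===== CLAIM (what is proved, stated in full; the proofs are below) =====
def Claim_equal_oracle_combining : Prop := ∀ (text : String) (mark : String), Dom_oracle_combining text mark → Spec_oracle_combining text mark (oracle_combining text mark)

-- ===== LEMMAS AND PROOFS =====

theorem oracleCombining_toNat_inj (a b : Char) (h : a.toNat = b.toNat) : a = b := by
  apply Char.ext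
  exact UInt32.toNat_inj.mp h

-- keys of the table come only from non-space chars of its source list
theorem oracleCombining_get?_of_not_mem (mark : List Char) (ch : Char) :
    ∀ (l : List Char) (d : PySem.Dict Nat (List Char)), ch ∉ l →
      (l.foldl (fun d c => if PySem.Chars.isspace c then d else d.insert c.toNat (c :: mark)) d).get? ch.toNat
        = d.get? ch.toNat := by
  intro l
  induction l with
  | nil => intro d _; rfl
  | cons c l ih =>
    intro d h
    simp only [List.mem_cons, not_or] at h
    simp only [List.foldl_cons]
    rw [ih _ h.2]
    by_cases hs : PySem.Chars.isspace c
    · simp only [hs, if_true]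
    · simp only [hs, Bool.false_eq_true, if_false]
      exact PySem.Dict.get?_insert_of_ne _ _
        (fun he => h.1 (oracleCombining_toNat_inj ch c he))

-- value at a member char's key
theorem oracleCombining_get?_of_mem (mark : List Char) (ch : Char) :
    ∀ (l : List Char) (d : PySem.Dict Nat (List Char)), ch ∈ l →
      (l.foldl (fun d c => if PySem.Chars.isspace c then d else d.insert c.toNat (c :: mark)) d).get? ch.toNat
        = if PySem.Chars.isspace ch then d.get? ch.toNat else some (ch :: mark) := by
  intro l
  induction l with
  | nil => intro d h; cases h
  | cons c l ih =>
    intro d h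
    simp only [List.foldl_cons]
    by_cases hm : ch ∈ l
    · rw [ih _ hm]
      by_cases hs : PySem.Chars.isspace ch
      · simp only [hs, if_true]
        by_cases hcs : PySem.Chars.isspace c
        · simp only [hcs, if_true]
        · simp only [hcs, Bool.false_eq_true, if_false]
          refine PySem.Dict.get?_insert_of_ne _ _ (fun he => ?_)
          exact hcs (oracleCombining_toNat_inj ch c he ▸ hs)
      · simp only [hs, Bool.false_eq_true, if_false]
    · have hc : ch = c := by
        rcases List.mem_cons.mp h with h1 | h2
        · exact h1
        · exact absurd h2 hm
      subst hc
      rw [oracleCombining_get?_of_not_mem mark ch l _ hm]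
      by_cases hs : PySem.Chars.isspace ch
      · simp only [hs, if_true]
      · simp only [hs, Bool.false_eq_true, if_false, PySem.Dict.get?_insert_self]

theorem oracleCombiningTable_get? (text mark : List Char) (ch : Char) (h : ch ∈ text) :
    (oracleCombiningTable text mark).get? ch.toNat
      = if PySem.Chars.isspace ch then none else some (ch :: mark) := by
  unfold oracleCombiningTable
  rw [oracleCombining_get?_of_mem mark ch _ PySem.Dict.empty
        ((PySem.Set.mem_ofList text ch).mpr h)]
  split_ifs <;> rfl

-- A's foldl, flattened, is a flattened map of per-character pieces
theorem oracleCombining_fold_flatten (mark : List Char) :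
    ∀ (l : List Char) (acc : List (List Char)),
      (l.foldl
        (fun out ch =>
          if ch = '\n' ∨ ch = '\r' then out ++ [[ch]]
          else if PySem.Chars.isspace ch then out ++ [[ch]]
          else out ++ [[ch], mark])
        acc).flatten
      = acc.flatten ++
        (l.map (fun ch => if PySem.Chars.isspace ch then [ch] else ch :: mark)).flatten := by
  intro l
  induction l with
  | nil => intro acc; simp
  | cons c l ih =>
    intro acc
    simp only [List.foldl_cons, List.map_cons, List.flatten_cons]
    rw [ih]
    by_cases h1 : c = '\n' ∨ c = '\r'
    · have hs : PySem.Chars.isspace c = true := by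
        rcases h1 with h | h <;> subst h <;> decide
      simp [h1, hs]
    · simp only [h1, if_false]
      by_cases hs : PySem.Chars.isspace c <;> simp [hs]

-- ===== VERDICT (by name: the statement is the Claim_ definition above) =====
theorem oracle_combining_spec : Claim_equal_oracle_combining := by
  intro text mark _
  unfold Spec_oracle_combining oracle_combining oracle_combining_alt
  simp only []
  rw [oracleCombining_fold_flatten mark.toList text.toList []]
  congr 1
  simp only [List.flatten_nil, List.nil_append]
  congr 1
  apply List.map_congr_left
  intro ch hch
  rw [oracleCombiningTable_get? text.toList mark.toList ch hch]
  split_ifs with hs <;> rfl
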